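-- pv_equiv track=rewrite | github.com/ios-buu/PyGuruParser | suppose/counter.py | count_request_param_location
-- ===== SOURCE A (Python) =====
-- def add_elem(data_list,index,element,default=None):
--     if len(data_list) >= index:
--         data_list.insert(index,element)
--         return data_list
--     for i in range(len(data_list),index):
--         data_list.insert(i,default)
--     data_list.insert(index,element)
--     return data_list
--
-- def count_request_param_location(data_set):
--     """
--     请求参数的位置统计，[['query','/user/{id}',info_id,'get'],['param','/user/{id}',info_id,'get']]
--     :param data_set:
--     :return:
--     (['query', 'param'], [0, 1, 2], [[0, 1, 1], [0, 0, 1]], [0, 1, 2], [0, 1, 1])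
--     ?1: 所有参数位置的列表
--     ?2: 参数个数
--     ?3: [[0, 1, 1], [0, 0, 1]] 代表着query中没有参数的url有0个，有一个参数的url有1个，有两个参数的url有1个。param中，只有1个带2个参数的url，其他都没有
--     ?4: 位置个数
--     ?5: [0, 1, 1] 没有参数的url有0个，有1个位置参数的url有1个，有2个位置参数的有1个
--     """
--     api_in_location_count_map = {}
--     api_map = {}
--     maximum_location = 0
--     maximum_param = 0
--     for elem in data_set:
--         location = elem[0]
--         api = f'{str(elem[2])}<::>{str(elem[3])}<::>{elem[1]}'
--         api_count_map = {}
--         if location in api_in_location_count_map: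
--             api_count_map = api_in_location_count_map[location]
--         if api not in api_map:
--             api_map[api] = set()
--         if api not in api_count_map:
--             api_count_map[api] = 1
--         else:
--             api_count_map[api]+=1
--         api_map[api].add(location)
--         api_in_location_count_map[location] = api_count_map
--     location_list = []
--     location_index_map = {}
--     location_index = 0
--     for url in api_map:
--         if len(api_map[url])>maximum_location:
--             maximum_location= len(api_map[url])
--     for location in api_in_location_count_map:
--         for info in api_in_location_count_map[location]:
--             location_elem = api_in_location_count_map[location][info]
--             if location_elem>maximum_param:
--                 maximum_param = location_elem
--         if location not in location_list:
--             location_list.append(location)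
--             location_index_map[location] = location_index
--             location_index+=1
--     param_count_list_list = []
--     param_count_index_list = []
--     location_count_list = []
--     location_count_index_list = []
--     for index in range(0,maximum_param+1):
--         param_count_list_list.append(add_elem([],location_index-1, 0, 0))
--
--     for index in range(0,maximum_param+1):
--         param_count_index_list.append(index)
--     for index in range(0, maximum_location+1):
--         location_count_index_list.append(index)
--         location_count_list.append(0)
--     for location in api_in_location_count_map:
--         api_count_map = api_in_location_count_map[location]
--         for api in api_count_map:
--             param_count_list_list[api_count_map[api]][location_index_map[location]] += 1
--     for location_set in api_map:
--         location_count_list[len(api_map[location_set])] +=1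
--
--     return location_list,param_count_index_list,param_count_list_list,location_count_index_list,location_count_list
-- ===== SOURCE B (Python) =====
-- def count_request_param_location(data_set):
--     # Relational restyle: flatten the input to a (location, api) pair list, then derive
--     # every output by dedup/count passes over that list -- no nested mutable tables.
--     pairs = [(e[0], f'{e[2]}<::>{e[3]}<::>{e[1]}') for e in data_set]
--     locs = []
--     for l, _ in pairs:
--         if l not in locs:
--             locs.append(l)
--     apis = []
--     for _, a in pairs:
--         if a not in apis:
--             apis.append(a)
--     dpairs = []
--     for p in pairs:
--         if p not in dpairs:
--             dpairs.append(p)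
--
--     max_param = max((pairs.count(p) for p in dpairs), default=0)
--     max_loc = max((sum(1 for q in dpairs if q[1] == a) for a in apis), default=0)
--
--     pcll = [[sum(1 for q in dpairs if q[0] == loc and pairs.count(q) == c)
--              for loc in locs] for c in range(max_param + 1)]
--     lcl = [sum(1 for a in apis if sum(1 for q in dpairs if q[1] == a) == k)
--            for k in range(max_loc + 1)]
--     return (locs, list(range(max_param + 1)), pcll,
--             list(range(max_loc + 1)), lcl)
-- ===== Notes on version B (the rewrite author's own statement) =====
-- stated objective: alternative
-- what changed: A aggregates through nested mutable dicts/sets in one pass and then fills tables by incremental += bumps; B instead flattens the input to a (location, api) pair list and derives every output relationally -- first-seen dedup lists, pairs.count multiplicities, and each table cell computed directly as a count-comprehension over the distinct pairs, with no dicts and no in-place table mutation.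
-- intended difference: On the empty input A returns [[0]] as the param-count table (a width-1 zero row created by add_elem's negative-index insert although there are zero locations) while B returns the intended width-0 row [[]]; on every other input in Pre_ they agree exactly. — e.g. on count_request_param_location([]): A returns ([], [0], [[0]], [0], [0]), B returns ([], [0], [[]], [0], [0])
import Mathlib
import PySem

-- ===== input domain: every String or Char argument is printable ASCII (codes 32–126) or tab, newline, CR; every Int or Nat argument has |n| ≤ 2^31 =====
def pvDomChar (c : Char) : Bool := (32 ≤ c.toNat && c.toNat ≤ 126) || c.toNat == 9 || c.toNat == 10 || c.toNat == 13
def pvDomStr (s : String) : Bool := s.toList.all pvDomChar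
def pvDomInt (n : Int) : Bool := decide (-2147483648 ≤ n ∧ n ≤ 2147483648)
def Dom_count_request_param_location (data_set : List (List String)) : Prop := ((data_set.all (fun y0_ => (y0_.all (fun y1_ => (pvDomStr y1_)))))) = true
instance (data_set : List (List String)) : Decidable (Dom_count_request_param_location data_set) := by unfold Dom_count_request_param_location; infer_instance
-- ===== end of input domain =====

-- B replaces A's nested mutable dict/set aggregation and +=-bump table fills by a relational
-- derivation over the flat (location, api) pair list (dedup lists, count scans, cells computed
-- directly); objective: alternative. On the empty input B returns a width-0 row where A's
-- add_elem accident gives [[0]] (see D_ below).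

-- shared transliteration of the f-string 'f"{str(elem[2])}<::>{str(elem[3])}<::>{elem[1]}"' (both Pythons build it identically)
def pvApi (elem : List String) : String :=
  PySem.List.pyGetD elem 2 "" ++ "<::>" ++ PySem.List.pyGetD elem 3 "" ++ "<::>" ++ PySem.List.pyGetD elem 1 ""

-- shared transliteration of 'rows[i][j] += 1' (both Pythons contain this statement in spirit: A mutates, B counts; A's port uses it)
def pvBump (pcll : List (List Int)) (i j : Int) : List (List Int) :=
  let row := PySem.List.pyGetD pcll i []
  PySem.List.pySetD pcll i (PySem.List.pySetD row j (PySem.List.pyGetD row j 0 + 1))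

-- transliteration of 'lcl[n] += 1' (A only)
def pvTally (lcl : List Int) (n : Int) : List Int :=
  PySem.List.pySetD lcl n (PySem.List.pyGetD lcl n 0 + 1)

-- ===== PORT A =====
def add_elem (data_list : List Int) (index : Int) (element : Int) (default : Int) : List Int :=
  if index ≤ (data_list.length : Int) then
    PySem.List.insert data_list index element
  else
    let dl := (PySem.List.pyRange (data_list.length : Int) index).foldl
      (fun dl i => PySem.List.insert dl i default) data_list
    PySem.List.insert dl index element

-- first loop of A: builds api_in_location_count_map and api_map
def pvStep1A (st : PySem.Dict String (PySem.Dict String Int) × PySem.Dict String (PySem.Set String))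
    (elem : List String) :
    PySem.Dict String (PySem.Dict String Int) × PySem.Dict String (PySem.Set String) :=
  let ailcm := st.1
  let am := st.2
  let location := PySem.List.pyGetD elem 0 ""
  let api := pvApi elem
  let acm := if ailcm.contains location then ailcm.getD location PySem.Dict.empty else PySem.Dict.empty
  let am1 := if am.contains api then am else am.insert api PySem.Set.empty
  let acm1 := if acm.contains api then acm.insert api (acm.getD api 0 + 1) else acm.insert api 1
  let am2 := am1.insert api (PySem.Set.add (am1.getD api PySem.Set.empty) location)
  (ailcm.insert location acm1, am2)

-- inner 'for info in …' running maximum of A's third loop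
def pvMaxInA (acm : PySem.Dict String Int) (mp : Int) : Int :=
  acm.keys.foldl (fun mp info =>
    let location_elem := acm.getD info 0
    if location_elem > mp then location_elem else mp) mp

-- the 'if location not in location_list' body of A's third loop
def pvLocStepA (t : List String × PySem.Dict String Int × Int) (location : String) :
    List String × PySem.Dict String Int × Int :=
  if t.1.contains location then t
  else (t.1 ++ [location], t.2.1.insert location t.2.2, t.2.2 + 1)

def count_request_param_location (data_set : List (List String)) :
    List String × List Int × List (List Int) × List Int × List Int :=
  let st := data_set.foldl pvStep1A (PySem.Dict.empty, PySem.Dict.empty)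
  let ailcm := st.1
  let am := st.2
  let maximum_location : Int := am.keys.foldl (fun m url =>
    if PySem.Set.len (am.getD url PySem.Set.empty) > m then PySem.Set.len (am.getD url PySem.Set.empty) else m) 0
  let st2 := ailcm.keys.foldl
    (fun (st2 : Int × List String × PySem.Dict String Int × Int) location =>
      (pvMaxInA (ailcm.getD location PySem.Dict.empty) st2.1, pvLocStepA st2.2 location))
    (0, [], PySem.Dict.empty, 0)
  let maximum_param := st2.1
  let location_list := st2.2.1
  let location_index_map := st2.2.2.1
  let location_index := st2.2.2.2
  let param_count_list_list := (PySem.List.pyRange 0 (maximum_param + 1)).foldl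
    (fun acc _ => acc ++ [add_elem [] (location_index - 1) 0 0]) []
  let param_count_index_list := (PySem.List.pyRange 0 (maximum_param + 1)).foldl
    (fun acc index => acc ++ [index]) []
  let lc := (PySem.List.pyRange 0 (maximum_location + 1)).foldl
    (fun (acc : List Int × List Int) index => (acc.1 ++ [index], acc.2 ++ [(0 : Int)])) ([], [])
  let location_count_index_list := lc.1
  let location_count_list0 := lc.2
  let pcll := ailcm.keys.foldl (fun pcll location =>
      let api_count_map := ailcm.getD location PySem.Dict.empty
      api_count_map.keys.foldl (fun pcll api =>
        pvBump pcll (api_count_map.getD api 0) (location_index_map.getD location 0)) pcll)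
    param_count_list_list
  let location_count_list := am.keys.foldl (fun lcl location_set =>
      pvTally lcl (PySem.Set.len (am.getD location_set PySem.Set.empty))) location_count_list0
  (location_list, param_count_index_list, pcll, location_count_index_list, location_count_list)

-- ===== PORT B =====
-- 'pairs = [(e[0], f'{e[2]}<::>{e[3]}<::>{e[1]}') for e in data_set]'
def pvPair (e : List String) : String × String := (PySem.List.pyGetD e 0 "", pvApi e)

def count_request_param_location_alt (data_set : List (List String)) :
    List String × List Int × List (List Int) × List Int × List Int :=
  let pairs := data_set.map pvPair
  let locs := pairs.foldl (fun acc q => if acc.contains q.1 then acc else acc ++ [q.1]) []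
  let apis := pairs.foldl (fun acc q => if acc.contains q.2 then acc else acc ++ [q.2]) []
  let dpairs := pairs.foldl (fun acc q => if acc.contains q then acc else acc ++ [q]) []
  let max_param := (PySem.List.max?
    (dpairs.map (fun q => (PySem.List.count pairs q : Int))) (fun x => x)).getD 0
  let max_loc := (PySem.List.max?
    (apis.map (fun a => (dpairs.countP (fun q => q.2 == a) : Int))) (fun x => x)).getD 0
  let pcll := (PySem.List.pyRange 0 (max_param + 1)).map (fun c =>
    locs.map (fun loc => (dpairs.countP
      (fun q => q.1 == loc && (PySem.List.count pairs q : Int) == c) : Int)))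
  let lcl := (PySem.List.pyRange 0 (max_loc + 1)).map (fun k =>
    (apis.countP (fun a => (dpairs.countP (fun q => q.2 == a) : Int) == k) : Int))
  (locs, PySem.List.pyRange 0 (max_param + 1), pcll, PySem.List.pyRange 0 (max_loc + 1), lcl)

-- ===== PRECONDITION & SPEC =====
-- Pre_ excludes rows shorter than 4 entries, on which Python A raises IndexError at elem[3] (or earlier).
def Pre_count_request_param_location (data_set : List (List String)) : Prop :=
  ∀ e ∈ data_set, 4 ≤ e.length
instance (data_set : List (List String)) : Decidable (Pre_count_request_param_location data_set) := by
  unfold Pre_count_request_param_location; infer_instance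
def pvWitness_count_request_param_location : List (List String) :=
  [["query", "/user/{id}", "1", "get"], ["param", "/user/{id}", "1", "get"]]

-- On the empty input A returns [[0]] for the param-count table (a width-1 zero row produced by
-- add_elem's negative-index insert although there are zero locations), while B returns the intended
-- width-0 row [[]]; everywhere else they agree.
def D_count_request_param_location (data_set : List (List String)) : Prop := data_set = []
instance (data_set : List (List String)) : Decidable (D_count_request_param_location data_set) := by
  unfold D_count_request_param_location; infer_instance

def Spec_count_request_param_location (data_set : List (List String))
    (out : List String × List Int × List (List Int) × List Int × List Int) : Prop :=
  ¬ D_count_request_param_location data_set → out = count_request_param_location_alt data_set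
instance (data_set : List (List String)) (out : List String × List Int × List (List Int) × List Int × List Int) :
    Decidable (Spec_count_request_param_location data_set out) := by
  unfold Spec_count_request_param_location; infer_instance

def pvDiffWitness_count_request_param_location : List (List String) := []
def pvDiffWitnessOut_count_request_param_location :
    (List String × List Int × List (List Int) × List Int × List Int) ×
    (List String × List Int × List (List Int) × List Int × List Int) :=
  (([], [0], [[0]], [0], [0]), ([], [0], [[]], [0], [0]))

-- ===== CLAIM (what is proved, stated in full; the proofs are below) =====
def Claim_unchanged_count_request_param_location : Prop := ∀ (data_set : List (List String)), Dom_count_request_param_location data_set → Pre_count_request_param_location data_set → Spec_count_request_param_location data_set (count_request_param_location data_set)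
def Claim_changed_count_request_param_location : Prop := Dom_count_request_param_location (pvDiffWitness_count_request_param_location) ∧ Pre_count_request_param_location (pvDiffWitness_count_request_param_location) ∧ D_count_request_param_location (pvDiffWitness_count_request_param_location) ∧ count_request_param_location (pvDiffWitness_count_request_param_location) = pvDiffWitnessOut_count_request_param_location.1 ∧ count_request_param_location_alt (pvDiffWitness_count_request_param_location) = pvDiffWitnessOut_count_request_param_location.2 ∧ pvDiffWitnessOut_count_request_param_location.1 ≠ pvDiffWitnessOut_count_request_param_location.2
def Claim_exact_count_request_param_location : Prop := ∀ (data_set : List (List String)), Dom_count_request_param_location data_set → Pre_count_request_param_location data_set → D_count_request_param_location data_set → count_request_param_location data_set ≠ count_request_param_location_alt data_set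

-- ===== LEMMAS AND PROOFS =====

-- getD of a key the dict does not contain is the default
theorem pv_getD_not_contains {ν : Type} (d : PySem.Dict String ν) (k : String) (d0 : ν)
    (h : d.contains k = false) : d.getD k d0 = d0 := by
  have : d.get? k = none := (PySem.Dict.get?_eq_none_iff_contains d k).2 h
  simp [PySem.Dict.getD, this]

theorem pv_acm_eq (acm : PySem.Dict String Int) (api : String) :
    (if acm.contains api then acm.insert api (acm.getD api 0 + 1) else acm.insert api 1)
      = acm.insert api (acm.getD api 0 + 1) := by
  by_cases h : acm.contains api
  · simp [h]
  · have h' : acm.contains api = false := by simpa using h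
    rw [if_neg h, pv_getD_not_contains _ _ _ h']
    norm_num

theorem pv_acm0_eq (ailcm : PySem.Dict String (PySem.Dict String Int)) (loc : String) :
    (if ailcm.contains loc then ailcm.getD loc PySem.Dict.empty else PySem.Dict.empty)
      = ailcm.getD loc PySem.Dict.empty := by
  by_cases h : ailcm.contains loc
  · simp [h]
  · have h' : ailcm.contains loc = false := by simpa using h
    rw [if_neg h, pv_getD_not_contains _ _ _ h']

theorem pv_am_eq (am : PySem.Dict String (PySem.Set String)) (loc api : String) :
    (let am1 := if am.contains api then am else am.insert api PySem.Set.empty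
     am1.insert api (PySem.Set.add (am1.getD api PySem.Set.empty) loc))
    = am.insert api (PySem.Set.add (am.getD api PySem.Set.empty) loc) := by
  by_cases h : am.contains api
  · simp [h]
  · have h' : am.contains api = false := by simpa using h
    simp only [h', Bool.false_eq_true, if_false]
    rw [PySem.Dict.getD_insert_self, PySem.Dict.insert_insert_self,
      pv_getD_not_contains _ _ _ h']

-- A's build step, normalized to act on the (location, api) pair
def pvStepP (st : PySem.Dict String (PySem.Dict String Int) × PySem.Dict String (PySem.Set String))
    (q : String × String) :
    PySem.Dict String (PySem.Dict String Int) × PySem.Dict String (PySem.Set String) :=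
  (st.1.insert q.1 ((st.1.getD q.1 PySem.Dict.empty).insert q.2
      ((st.1.getD q.1 PySem.Dict.empty).getD q.2 0 + 1)),
   st.2.insert q.2 (PySem.Set.add (st.2.getD q.2 PySem.Set.empty) q.1))

theorem pvStepA_eq (st : PySem.Dict String (PySem.Dict String Int) × PySem.Dict String (PySem.Set String))
    (e : List String) : pvStep1A st e = pvStepP st (pvPair e) := by
  unfold pvStep1A pvStepP pvPair
  simp only [pv_acm0_eq, pv_acm_eq, pv_am_eq]

-- count of a pair in the input, as both ports compute it
def pvCnt (p : List (String × String)) (q : String × String) : Int := (PySem.List.count p q : Int)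

-- distinct apis seen at location l, in first-seen order
def pvAs (p : List (String × String)) (l : String) : List String :=
  PySem.Set.ofList ((p.filter (fun q => q.1 == l)).map Prod.snd)

-- A's nested (location, api) iteration, flattened
def pvL0 (p : List (String × String)) : List (String × String) :=
  (PySem.Set.ofList (p.map Prod.fst)).flatMap (fun l => (pvAs p l).map (fun a => (l, a)))

-- characterization of A's build fold in terms of the flat pair list
theorem pvKeysAdd {ν : Type} (d : PySem.Dict String ν) (k : String) (v : ν) :
    (d.insert k v).keys = PySem.Set.add d.keys k := by
  by_cases h : d.contains k
  · rw [PySem.Dict.keys_insert_of_contains d v h,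
      PySem.Set.add_of_mem ((PySem.Dict.contains_iff_mem_keys d k).1 h)]
  · have h' : d.contains k = false := by simpa using h
    rw [PySem.Dict.keys_insert_of_not_contains d v h',
      PySem.Set.add_of_not_mem (fun hm => by simp [(PySem.Dict.contains_iff_mem_keys d k).2 hm] at h')]

theorem pvChar (p : List (String × String)) :
    (p.foldl pvStepP (PySem.Dict.empty, PySem.Dict.empty)).1.keys = PySem.Set.ofList (p.map Prod.fst)
    ∧ (p.foldl pvStepP (PySem.Dict.empty, PySem.Dict.empty)).2.keys = PySem.Set.ofList (p.map Prod.snd)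
    ∧ (∀ l, ((p.foldl pvStepP (PySem.Dict.empty, PySem.Dict.empty)).1.getD l PySem.Dict.empty).keys = pvAs p l)
    ∧ (∀ l a, ((p.foldl pvStepP (PySem.Dict.empty, PySem.Dict.empty)).1.getD l PySem.Dict.empty).getD a 0 = pvCnt p (l, a))
    ∧ (∀ a, (p.foldl pvStepP (PySem.Dict.empty, PySem.Dict.empty)).2.getD a PySem.Set.empty
          = PySem.Set.ofList ((p.filter (fun q => q.2 == a)).map Prod.fst)) := by
  induction p using List.reverseRecOn with
  | nil =>
    refine ⟨by simp, by simp, ?_, ?_, ?_⟩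
    · intro l; simp [pvAs, PySem.Set.ofList]
    · intro l a; simp [pvCnt, PySem.List.count]
    · intro a; simp [PySem.Set.ofList, PySem.Set.empty]
  | append_singleton t x ih =>
    obtain ⟨ih1, ih2, ih3, ih4, ih5⟩ := ih
    rw [List.foldl_append]
    set S := t.foldl pvStepP (PySem.Dict.empty, PySem.Dict.empty) with hS
    simp only [List.foldl_cons, List.foldl_nil]
    refine ⟨?_, ?_, ?_, ?_, ?_⟩
    · show (S.1.insert x.1 _).keys = _
      rw [pvKeysAdd, ih1, List.map_append]
      simp only [List.map_cons, List.map_nil]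
      rw [PySem.Set.ofList_append_singleton]
    · show (S.2.insert x.2 _).keys = _
      rw [pvKeysAdd, ih2, List.map_append]
      simp only [List.map_cons, List.map_nil]
      rw [PySem.Set.ofList_append_singleton]
    · intro l
      show ((S.1.insert x.1 _).getD l PySem.Dict.empty).keys = _
      rw [PySem.Dict.getD_insert]
      by_cases hl : l = x.1
      · subst hl
        rw [if_pos rfl, pvKeysAdd, ih3]
        unfold pvAs
        rw [List.filter_append, List.map_append]
        simp only [List.filter_cons, List.filter_nil, beq_self_eq_true, if_true]
        simp [PySem.Set.ofList_append_singleton]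
      · rw [if_neg hl]
        unfold pvAs
        rw [List.filter_append]
        have : (([x] : List (String × String)).filter (fun q => q.1 == l)) = [] := by
          simp [Ne.symm hl]
        rw [this, List.append_nil]
        exact ih3 l
    · intro l a
      show ((S.1.insert x.1 _).getD l PySem.Dict.empty).getD a 0 = _
      rw [PySem.Dict.getD_insert]
      have hcnt : pvCnt (t ++ [x]) (l, a) = pvCnt t (l, a) + (if x = (l, a) then 1 else 0) := by
        simp only [pvCnt, PySem.List.count, List.count_append]
        by_cases hx : x = (l, a)
        · subst hx; simp
        · simp [hx]
      by_cases hl : l = x.1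
      · subst hl
        rw [if_pos rfl, PySem.Dict.getD_insert]
        by_cases ha : a = x.2
        · subst ha
          rw [if_pos rfl, ih4, hcnt, if_pos (by rw [Prod.ext_iff]; exact ⟨rfl, rfl⟩)]
        · rw [if_neg ha, ih4, hcnt, if_neg (by intro h; exact ha (by rw [h]))]
          ring
      · rw [if_neg hl, ih4, hcnt, if_neg (by intro h; exact hl (by rw [h])), add_zero]
    · intro a
      show (S.2.insert x.2 _).getD a PySem.Set.empty = _
      rw [PySem.Dict.getD_insert]
      by_cases ha : a = x.2
      · subst ha
        rw [if_pos rfl, ih5]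
        rw [List.filter_append]
        simp only [List.filter_cons, List.filter_nil, beq_self_eq_true, if_true]
        rw [List.map_append]
        simp only [List.map_cons, List.map_nil]
        rw [PySem.Set.ofList_append_singleton]
      · rw [if_neg ha]
        rw [List.filter_append]
        have : (([x] : List (String × String)).filter (fun q => q.2 == a)) = [] := by
          simp [Ne.symm ha]
        rw [this, List.append_nil]
        exact ih5 a

-- B's 'if x not in out: out.append(x)' loop over a projection is set(map(f, l))
theorem pvDedup_eq {α β : Type} [BEq α] [LawfulBEq α] (l : List β) (f : β → α) :
    l.foldl (fun acc x => if acc.contains (f x) then acc else acc ++ [f x]) []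
      = PySem.Set.ofList (l.map f) := by
  rw [PySem.Set.ofList_eq_foldl, List.foldl_map]
  refine PySem.List.foldl_congr_mem _ _ _ _ (fun acc x _ => ?_)
  rw [PySem.Set.add_eq_ite]
  simp

-- A's running 'if x > m then x else m' is a running max
theorem pv_if_max (a b : Int) : (if b > a then b else a) = max a b := by
  split_ifs with h <;> omega

-- Python max(l, default=0) is A's running max from 0, for nonnegative values
theorem pvMaxD0 (l : List Int) (h : ∀ x ∈ l, 0 ≤ x) :
    (PySem.List.max? l (fun x => x)).getD 0 = l.foldl (fun m v => max m v) 0 := by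
  cases l with
  | nil => simp [PySem.List.max?]
  | cons x t =>
    rw [PySem.List.max?_id_cons]
    simp only [Option.getD_some, List.foldl_cons]
    have : max 0 x = x := by
      have := h x (List.mem_cons_self ..); omega
    rw [this]

-- a running max from 0 only depends on the set of (nonnegative) values
theorem pvMaxMemEq (l1 l2 : List Int) (hm : ∀ v, v ∈ l1 ↔ v ∈ l2) :
    l1.foldl (fun m v => max m v) 0 = l2.foldl (fun m v => max m v) 0 := by
  have key : ∀ (a b : List Int), (∀ v ∈ a, v ∈ b) →
      a.foldl (fun m v => max m v) 0 ≤ b.foldl (fun m v => max m v) 0 := by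
    intro a b hab
    rcases PySem.List.foldl_max_mem a 0 with hc | hc
    · rw [hc]
      exact (PySem.List.le_foldl_max_int b (fun v => v) 0).1
    · exact (PySem.List.le_foldl_max_int b (fun v => v) 0).2 _ (hab _ hc)
  exact le_antisymm (key l1 l2 (fun v hv => (hm v).1 hv)) (key l2 l1 (fun v hv => (hm v).2 hv))

-- A's third loop location bookkeeping: list of keys, index map, counter
theorem pvLoc_spec (l : List String) (ll : List String) (lim : PySem.Dict String Int) (li : Int)
    (hnd : l.Nodup) (hf : ∀ x ∈ l, ll.contains x = false) :
    (l.foldl pvLocStepA (ll, lim, li)).1 = ll ++ l ∧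
    (l.foldl pvLocStepA (ll, lim, li)).2.2 = li + l.length ∧
    (∀ y, y ∉ l → (l.foldl pvLocStepA (ll, lim, li)).2.1.getD y 0 = lim.getD y 0) ∧
    (∀ i (h : i < l.length), (l.foldl pvLocStepA (ll, lim, li)).2.1.getD l[i] 0 = li + i) := by
  induction l generalizing ll lim li with
  | nil => simp
  | cons x t ih =>
    have hx : ll.contains x = false := hf x (List.mem_cons_self ..)
    have hstep : pvLocStepA (ll, lim, li) x = (ll ++ [x], lim.insert x li, li + 1) := by
      unfold pvLocStepA; rw [if_neg (by rw [hx]; simp)]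
    have hnd' : t.Nodup := hnd.of_cons
    have hxt : x ∉ t := by simp [List.nodup_cons] at hnd; exact hnd.1
    have hf' : ∀ y ∈ t, (ll ++ [x]).contains y = false := by
      intro y hy
      have h1 : ll.contains y = false := hf y (List.mem_cons_of_mem _ hy)
      have h2 : y ≠ x := fun he => hxt (he ▸ hy)
      simp only [List.contains_append, Bool.or_eq_false_iff]
      exact ⟨h1, by simp [h2]⟩
    obtain ⟨ih1, ih2, ih3, ih4⟩ := ih (ll ++ [x]) (lim.insert x li) (li + 1) hnd' hf'
    simp only [List.foldl_cons, hstep]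
    refine ⟨by rw [ih1]; simp, by rw [ih2]; simp; omega, ?_, ?_⟩
    · intro y hy
      rw [ih3 y (fun h => hy (List.mem_cons_of_mem _ h))]
      exact PySem.Dict.getD_insert_of_ne _ _ _ (fun he => hy (he ▸ List.mem_cons_self ..))
    · intro i hi
      cases i with
      | zero =>
        simp only [List.getElem_cons_zero]
        rw [ih3 x hxt, PySem.Dict.getD_insert_self]
        simp
      | succ j =>
        have hj : j < t.length := by simpa using hi
        have := ih4 j hj
        simp only [List.getElem_cons_succ]
        rw [this]
        push_cast
        ring

-- add_elem on the empty list builds a zero row of width n (n ≥ 1)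
theorem pv_fold_insert (m : Nat) :
    (PySem.List.pyRange 0 (m : Int)).foldl (fun dl i => PySem.List.insert dl i (0 : Int)) []
      = List.replicate m 0 := by
  induction m with
  | zero => simp [PySem.List.pyRange]
  | succ k ih =>
    have : ((k + 1 : Nat) : Int) = (k : Int) + 1 := by push_cast; ring
    rw [this, PySem.List.pyRange_one_succ_right (by positivity), List.foldl_append, ih]
    simp only [List.foldl_cons, List.foldl_nil]
    have := PySem.List.insert_len (List.replicate k (0:Int)) 0
    rw [PySem.List.len] at this
    simp only [List.length_replicate] at this
    rw [this, ← List.replicate_succ']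

theorem pv_add_elem_nil (n : Nat) (h : 1 ≤ n) :
    add_elem [] ((n : Int) - 1) 0 0 = List.replicate n 0 := by
  unfold add_elem
  rcases Nat.eq_or_lt_of_le h with h1 | h1
  · rw [if_pos (by simp; omega)]
    have : ((n : Int) - 1) = 0 := by omega
    rw [this, PySem.List.insert_zero]
    rw [← h1]; rfl
  · rw [if_neg (by simp; omega)]
    have e1 : ((([] : List Int).length : Int)) = 0 := by simp
    have e2 : ((n : Int) - 1) = ((n - 1 : Nat) : Int) := by omega
    rw [e1, e2, pv_fold_insert]
    have := PySem.List.insert_len (List.replicate (n-1) (0:Int)) 0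
    rw [PySem.List.len] at this
    simp only [List.length_replicate] at this
    rw [this, ← List.replicate_succ' ]
    congr 1
    omega

-- membership in the flattened nested iteration is membership in the input pairs
theorem pvMemL0 (p : List (String × String)) (q : String × String) : q ∈ pvL0 p ↔ q ∈ p := by
  unfold pvL0 pvAs
  rw [List.mem_flatMap]
  constructor
  · rintro ⟨l, hl, hq⟩
    rw [List.mem_map] at hq
    obtain ⟨a, ha, rfl⟩ := hq
    rw [PySem.Set.mem_ofList, List.mem_map] at ha
    obtain ⟨r, hr, rfl⟩ := ha
    rw [List.mem_filter] at hr
    have : r = (l, r.2) := by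
      have := hr.2; rw [beq_iff_eq] at this
      exact Prod.ext this rfl
    rw [← this]; exact hr.1
  · intro hq
    refine ⟨q.1, ?_, ?_⟩
    · rw [PySem.Set.mem_ofList, List.mem_map]; exact ⟨q, hq, rfl⟩
    · rw [List.mem_map]
      refine ⟨q.2, ?_, rfl⟩
      rw [PySem.Set.mem_ofList, List.mem_map]
      exact ⟨q, by rw [List.mem_filter]; exact ⟨hq, by simp⟩, rfl⟩

theorem pvNodupL0 (p : List (String × String)) : (pvL0 p).Nodup := by
  unfold pvL0
  rw [List.nodup_flatMap]
  constructor
  · intro l _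
    exact (PySem.Set.nodup_ofList _).map (fun a b hab => by simpa using hab)
  · refine (PySem.Set.nodup_ofList _).imp ?_
    intro l l' hne z hz hz'
    rw [List.mem_map] at hz hz'
    obtain ⟨a, _, rfl⟩ := hz
    obtain ⟨a', _, h⟩ := hz'
    exact hne (by simpa using congrArg Prod.fst h.symm)

-- the distinct-location set per api has as many elements as there are distinct pairs with that api
theorem pvNlBridge (p : List (String × String)) (a : String) :
    PySem.Set.len (PySem.Set.ofList ((p.filter (fun q => q.2 == a)).map Prod.fst))
      = (((PySem.Set.ofList p).countP (fun q => q.2 == a) : Nat) : Int) := by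
  rw [List.countP_eq_length_filter]
  simp only [PySem.Set.len]
  congr 1
  have hnd1 : ((PySem.Set.ofList p).filter (fun q => q.2 == a)).map Prod.fst |>.Nodup := by
    refine List.Nodup.map_on ?_ ((PySem.Set.nodup_ofList p).filter _)
    intro x hx y hy hxy
    rw [List.mem_filter] at hx hy
    have hx2 : x.2 = a := by have := hx.2; rwa [beq_iff_eq] at this
    have hy2 : y.2 = a := by have := hy.2; rwa [beq_iff_eq] at this
    exact Prod.ext hxy (hx2.trans hy2.symm)
  have hnd2 : (PySem.Set.ofList ((p.filter (fun q => q.2 == a)).map Prod.fst)).Nodup :=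
    PySem.Set.nodup_ofList _
  have hmem : ∀ z, z ∈ ((PySem.Set.ofList p).filter (fun q => q.2 == a)).map Prod.fst
      ↔ z ∈ PySem.Set.ofList ((p.filter (fun q => q.2 == a)).map Prod.fst) := by
    intro z
    rw [PySem.Set.mem_ofList, List.mem_map, List.mem_map]
    constructor
    · rintro ⟨r, hr, rfl⟩
      rw [List.mem_filter, PySem.Set.mem_ofList] at hr
      exact ⟨r, by rw [List.mem_filter]; exact hr, rfl⟩
    · rintro ⟨r, hr, rfl⟩
      rw [List.mem_filter] at hr
      exact ⟨r, by rw [List.mem_filter, PySem.Set.mem_ofList]; exact hr, rfl⟩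
  have hperm := (List.perm_ext_iff_of_nodup hnd1 hnd2).2 hmem
  calc (PySem.Set.ofList ((p.filter (fun q => q.2 == a)).map Prod.fst)).length
      = (((PySem.Set.ofList p).filter (fun q => q.2 == a)).map Prod.fst).length := hperm.length_eq.symm
    _ = ((PySem.Set.ofList p).filter (fun q => q.2 == a)).length := List.length_map ..

-- the += bump fill over a list of (row, col) increments counts occurrences per cell
theorem pvSetGetD {α : Type} (T : List α) (i0 : Nat) (r : α) (d : α) (h : i0 < T.length) (i : Nat) :
    (T.set i0 r).getD i d = if i = i0 then r else T.getD i d := by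
  rw [List.getD_eq_getElem?_getD, List.getD_eq_getElem?_getD, List.getElem?_set]
  by_cases h1 : i = i0
  · subst h1
    rw [if_pos rfl, if_pos h, if_pos rfl]
    simp
  · rw [if_neg (fun hc => h1 hc.symm), if_neg h1]

theorem pvBumpFold (L : List (String × String)) (f g : String × String → Int)
    (w : Nat) (T : List (List Int))
    (hT : ∀ i : Nat, i < T.length → (T.getD i []).length = w)
    (hL : ∀ q ∈ L, ∃ i j : Nat, f q = (i : Int) ∧ g q = (j : Int) ∧ i < T.length ∧ j < w) :
    (L.foldl (fun t q => pvBump t (f q) (g q)) T).length = T.length ∧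
    (∀ i : Nat, i < T.length → ((L.foldl (fun t q => pvBump t (f q) (g q)) T).getD i []).length = w) ∧
    ∀ (i j : Nat), i < T.length → j < w →
      ((L.foldl (fun t q => pvBump t (f q) (g q)) T).getD i []).getD j 0
        = (T.getD i []).getD j 0 + (L.countP (fun q => f q == (i : Int) && g q == (j : Int)) : Int) := by
  induction L generalizing T with
  | nil =>
    exact ⟨rfl, hT, fun i j hi hj => by simp⟩
  | cons q tl ih =>
    obtain ⟨i0, j0, hf, hg, hi0, hj0⟩ := hL q (List.mem_cons_self ..)
    have hb : pvBump T (f q) (g q)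
        = T.set i0 ((T.getD i0 []).set j0 ((T.getD i0 []).getD j0 0 + 1)) := by
      unfold pvBump
      rw [hf, hg]
      simp [PySem.List.pyGetD_natCast, PySem.List.pySetD_natCast]
    set r := (T.getD i0 []).set j0 ((T.getD i0 []).getD j0 0 + 1) with hr
    set T' := T.set i0 r with hT'
    have hlen' : T'.length = T.length := by simp [hT']
    have hrows' : ∀ i : Nat, i < T'.length → (T'.getD i []).length = w := by
      intro i hi
      rw [hlen'] at hi
      rw [hT', pvSetGetD T i0 r [] hi0 i]
      split_ifs with h
      · rw [hr, List.length_set]; exact hT i0 hi0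
      · exact hT i hi
    have hL' : ∀ x ∈ tl, ∃ i j : Nat, f x = (i : Int) ∧ g x = (j : Int) ∧ i < T'.length ∧ j < w := by
      intro x hx
      obtain ⟨i, j, h1, h2, h3, h4⟩ := hL x (List.mem_cons_of_mem _ hx)
      exact ⟨i, j, h1, h2, by omega, h4⟩
    obtain ⟨l1, l2, l3⟩ := ih T' hrows' hL'
    simp only [List.foldl_cons]
    rw [hb]
    refine ⟨by rw [l1, hlen'], by intro i hi; exact l2 i (by omega), ?_⟩
    intro i j hi hj
    rw [l3 i j (by omega) hj]
    rw [hT', pvSetGetD T i0 r [] hi0 i]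
    have hcntP : (List.countP (fun x => f x == (i:Int) && g x == (j:Int)) (q :: tl) : Int)
        = (List.countP (fun x => f x == (i:Int) && g x == (j:Int)) tl : Int)
          + (if i = i0 ∧ j = j0 then 1 else 0) := by
      rw [List.countP_cons]
      have : (f q == (i:Int) && g q == (j:Int)) = decide (i = i0 ∧ j = j0) := by
        rw [hf, hg]
        by_cases ha : i = i0
        · subst ha
          by_cases hb : j = j0
          · subst hb; simp
          · simp [hb, show ((j0:Int) ≠ (j:Int)) from by omega]
        · simp [ha, show ((i0:Int) ≠ (i:Int)) from by omega]
      rw [this]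
      by_cases h : i = i0 ∧ j = j0
      · simp [h]
      · simp [h]
    rw [hcntP]
    by_cases h1 : i = i0
    · subst h1
      rw [if_pos rfl, hr, pvSetGetD (T.getD i []) j0 _ 0 (by rw [hT i hi]; exact hj0) j]
      by_cases h2 : j = j0
      · subst h2
        rw [if_pos rfl, if_pos ⟨rfl, rfl⟩]; ring
      · rw [if_neg h2, if_neg (fun hc => h2 hc.2)]; ring
    · rw [if_neg h1, if_neg (fun hc => h1 hc.1)]; ring

-- the += tally over a list of values counts occurrences per slot
theorem pvTallyFold (L : List String) (f : String → Int) (T : List Int)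
    (hL : ∀ a ∈ L, ∃ k : Nat, f a = (k : Int) ∧ k < T.length) :
    (L.foldl (fun t a => pvTally t (f a)) T).length = T.length ∧
    ∀ k : Nat, k < T.length →
      (L.foldl (fun t a => pvTally t (f a)) T).getD k 0
        = T.getD k 0 + (L.countP (fun a => f a == (k : Int)) : Nat) := by
  induction L generalizing T with
  | nil => simp
  | cons a tl ih =>
    obtain ⟨k0, hf, hk0⟩ := hL a (List.mem_cons_self ..)
    have hb : pvTally T (f a) = T.set k0 (T.getD k0 0 + 1) := by
      unfold pvTally
      rw [hf]
      simp [PySem.List.pyGetD_natCast, PySem.List.pySetD_natCast]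
    set T' := T.set k0 (T.getD k0 0 + 1) with hT'
    have hlen' : T'.length = T.length := by simp [hT']
    have hL' : ∀ x ∈ tl, ∃ k : Nat, f x = (k : Int) ∧ k < T'.length := by
      intro x hx
      obtain ⟨k, h1, h2⟩ := hL x (List.mem_cons_of_mem _ hx)
      exact ⟨k, h1, by omega⟩
    obtain ⟨l1, l2⟩ := ih T' hL'
    simp only [List.foldl_cons]
    rw [hb]
    refine ⟨by rw [l1, hlen'], ?_⟩
    intro k hk
    rw [l2 k (by omega), hT', pvSetGetD T k0 _ 0 hk0 k]
    have hcntP : (List.countP (fun x => f x == (k:Int)) (a :: tl) : Int)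
        = (List.countP (fun x => f x == (k:Int)) tl : Int) + (if k = k0 then 1 else 0) := by
      rw [List.countP_cons]
      have : (f a == (k:Int)) = decide (k = k0) := by
        rw [hf]
        by_cases ha : k = k0
        · subst ha; simp
        · simp [ha, show ((k0:Int) ≠ (k:Int)) from by omega]
      rw [this]
      by_cases h : k = k0
      · simp [h]
      · simp [h]
    push_cast at hcntP ⊢
    rw [hcntP]
    split_ifs with h
    · rw [h]; ring
    · ring

-- B's 'if x not in out: out.append(x)' loop over the pairs themselves is set(l)
theorem pvDedupId {α : Type} [BEq α] [LawfulBEq α] (l : List α) :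
    l.foldl (fun acc x => if acc.contains x then acc else acc ++ [x]) []
      = PySem.Set.ofList l := by
  have h := pvDedup_eq l (fun x => x)
  simpa using h

-- getD at an in-range index is getElem
theorem pvGetDElem {α : Type} (l : List α) (d : α) (i : Nat) (h : i < l.length) :
    l.getD i d = l[i] := by
  rw [List.getD_eq_getElem?_getD, List.getElem?_eq_getElem h]
  rfl

theorem pv_main (ds : List (List String)) (hne : ds ≠ []) :
    count_request_param_location ds = count_request_param_location_alt ds := by
  obtain ⟨hK, hA, hAs, hCnt, hSet⟩ := pvChar (ds.map pvPair)
  unfold count_request_param_location count_request_param_location_alt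
  dsimp only
  have hfold : ds.foldl pvStep1A (PySem.Dict.empty, PySem.Dict.empty)
      = (ds.map pvPair).foldl pvStepP (PySem.Dict.empty, PySem.Dict.empty) := by
    rw [List.foldl_map]
    exact PySem.List.foldl_congr_mem _ _ _ _ (fun st e _ => pvStepA_eq st e)
  rw [hfold, pvDedup_eq (ds.map pvPair) Prod.fst, pvDedup_eq (ds.map pvPair) Prod.snd,
    pvDedupId (ds.map pvPair)]
  set p := ds.map pvPair with hp
  set S := p.foldl pvStepP (PySem.Dict.empty, PySem.Dict.empty) with hSd
  set K := PySem.Set.ofList (p.map Prod.fst) with hKd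
  set Aps := PySem.Set.ofList (p.map Prod.snd) with hAd
  set dp := PySem.Set.ofList p with hdp
  rw [hK, hA]
  rw [PySem.List.foldl_prod_mk
    (f := fun mp location => pvMaxInA (S.1.getD location PySem.Dict.empty) mp) (g := pvLocStepA)]
  dsimp only
  -- basic facts about the input and the location list
  have hpne : p ≠ [] := by
    rw [hp]
    simpa using hne
  have hKnd : K.Nodup := by rw [hKd]; exact PySem.Set.nodup_ofList _
  have hKne : K ≠ [] := by
    rw [hKd]
    cases hp2 : p with
    | nil => exact absurd hp2 hpne
    | cons x t => simp [PySem.Set.ofList_cons]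
  have hKlen : 1 ≤ K.length := by
    cases hk : K with
    | nil => exact absurd hk hKne
    | cons a t => simp
  set LOC := List.foldl pvLocStepA ([], PySem.Dict.empty, 0) K with hLOC
  obtain ⟨e1, e2, e3, e4⟩ := pvLoc_spec K [] PySem.Dict.empty 0 hKnd (fun x _ => rfl)
  rw [List.nil_append] at e1
  rw [zero_add] at e2
  have e4' : ∀ (k : Nat) (hk : k < K.length), LOC.2.1.getD K[k] 0 = (k : Int) := by
    intro k hk
    rw [hLOC, e4 k hk, zero_add]
  -- the permutation between A's nested distinct-pair iteration and B's dpairs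
  have hperm : (pvL0 p).Perm dp := by
    rw [hdp]
    exact (List.perm_ext_iff_of_nodup (pvNodupL0 p) (PySem.Set.nodup_ofList p)).2
      (fun q => (pvMemL0 p q).trans (PySem.Set.mem_ofList p q).symm)
  have hmemL0 : ∀ q, q ∈ pvL0 p ↔ q ∈ p := pvMemL0 p
  -- per-api distinct-location count, as B computes it
  set nl := fun a => ((List.countP (fun q => q.2 == a) dp : Nat) : Int) with hnl
  have hSetLen : ∀ a, PySem.Set.len (S.2.getD a PySem.Set.empty) = nl a := by
    intro a
    rw [hSet a, hnl, hdp]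
    exact pvNlBridge p a
  -- maximum_location: both sides are the running max of nl over Aps
  set mlv := Aps.foldl (fun m a => max m (nl a)) 0 with hmlv
  have hmlA : Aps.foldl (fun m url =>
      if PySem.Set.len (S.2.getD url PySem.Set.empty) > m then PySem.Set.len (S.2.getD url PySem.Set.empty) else m) 0 = mlv := by
    rw [hmlv]
    refine PySem.List.foldl_congr_mem _ _ _ _ (fun m a _ => ?_)
    rw [hSetLen a, pv_if_max]
  have hmlB : (PySem.List.max? (Aps.map nl) (fun x => x)).getD 0 = mlv := by
    rw [pvMaxD0, hmlv, List.foldl_map]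
    intro x hx
    obtain ⟨a, _, rfl⟩ := List.mem_map.1 hx
    rw [hnl]
    positivity
  -- maximum_param: both sides are the running max of pair counts
  set cnt := fun q => ((PySem.List.count p q : Nat) : Int) with hcnt
  have hcntEq : ∀ q, pvCnt p q = cnt q := fun _ => rfl
  set mpv := (pvL0 p).foldl (fun m q => max m (pvCnt p q)) 0 with hmpv
  have hmpv0 : 0 ≤ mpv := by
    rw [hmpv]
    exact (PySem.List.le_foldl_max_int (pvL0 p) (pvCnt p) 0).1
  have hmpvle : ∀ q ∈ pvL0 p, pvCnt p q ≤ mpv := by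
    rw [hmpv]
    exact (PySem.List.le_foldl_max_int (pvL0 p) (pvCnt p) 0).2
  have hL0flat : pvL0 p = K.flatMap (fun l => (pvAs p l).map (fun a => (l, a))) := by
    rw [pvL0, hKd]
  have hmpA : K.foldl (fun mp location => pvMaxInA (S.1.getD location PySem.Dict.empty) mp) 0 = mpv := by
    have hstep : ∀ (mp : Int) (l : String), l ∈ K → pvMaxInA (S.1.getD l PySem.Dict.empty) mp
        = ((pvAs p l).map (fun a => (l, a))).foldl (fun m q => max m (pvCnt p q)) mp := by
      intro mp l _
      unfold pvMaxInA
      rw [hAs l, List.foldl_map]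
      refine PySem.List.foldl_congr_mem _ _ _ _ (fun m a _ => ?_)
      dsimp only
      rw [hCnt l a, pv_if_max]
    rw [PySem.List.foldl_congr_mem _ _ _ _ hstep, hmpv, hL0flat, List.foldl_flatMap]
  have hmpB : (PySem.List.max? (dp.map cnt) (fun x => x)).getD 0 = mpv := by
    rw [pvMaxD0]
    · have h1 : (dp.map cnt).foldl (fun m v => max m v) 0
          = ((pvL0 p).map cnt).foldl (fun m v => max m v) 0 := by
        refine pvMaxMemEq _ _ (fun v => ?_)
        simp only [List.mem_map]
        constructor
        · rintro ⟨q, hq, rfl⟩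
          exact ⟨q, (hmemL0 q).2 ((PySem.Set.mem_ofList p q).1 (hdp ▸ hq)), rfl⟩
        · rintro ⟨q, hq, rfl⟩
          exact ⟨q, hdp ▸ ((PySem.Set.mem_ofList p q).2 ((hmemL0 q).1 hq)), rfl⟩
      rw [h1, List.foldl_map, hmpv]
      rfl
    · intro x hx
      obtain ⟨q, _, rfl⟩ := List.mem_map.1 hx
      rw [hcnt]
      positivity
  rw [hmlA, hmlB, hmpA, hmpB, e1, e2]
  -- index lists and initial tables
  rw [PySem.List.foldl_append_singleton_eq_self, List.nil_append]
  rw [PySem.List.foldl_prod_mk (f := fun acc index => acc ++ [index]) (g := fun acc _ => acc ++ [(0 : Int)])]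
  dsimp only
  rw [PySem.List.foldl_append_singleton_eq_self, List.nil_append]
  rw [PySem.List.foldl_append_singleton_eq_map (f := fun _ => (0 : Int)), List.nil_append, List.map_const']
  rw [PySem.List.foldl_append_singleton_eq_map (f := fun _ => add_elem [] ((K.length : Int) - 1) 0 0),
    List.nil_append, List.map_const', pv_add_elem_nil K.length hKlen]
  rw [PySem.List.length_pyRange_one, PySem.List.length_pyRange_one, Int.sub_zero, Int.sub_zero]
  -- the location-count histogram
  have hmlv0 : 0 ≤ mlv := by
    rw [hmlv]
    exact (PySem.List.le_foldl_max_int Aps nl 0).1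
  have hnlle : ∀ a ∈ Aps, nl a ≤ mlv := by
    rw [hmlv]
    exact (PySem.List.le_foldl_max_int Aps nl 0).2
  obtain ⟨t1, t2⟩ := pvTallyFold Aps nl (List.replicate (mlv + 1).toNat 0) (by
    intro a ha
    refine ⟨List.countP (fun q => q.2 == a) dp, rfl, ?_⟩
    have h1 : ((List.countP (fun q => q.2 == a) dp : Nat) : Int) ≤ mlv := hnlle a ha
    rw [List.length_replicate]
    omega)
  have htally : Aps.foldl (fun lcl a => pvTally lcl (PySem.Set.len (S.2.getD a PySem.Set.empty)))
        (List.replicate (mlv + 1).toNat 0)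
      = List.map (fun k => ((List.countP (fun a => ((List.countP (fun q => q.2 == a) dp : Nat) : Int) == k) Aps : Nat) : Int))
          (PySem.List.pyRange 0 (mlv + 1)) := by
    rw [PySem.List.foldl_congr_mem _ _ _ _ (fun lcl a _ => by rw [hSetLen a])]
    apply List.ext_getElem
    · rw [t1, List.length_replicate, List.length_map, PySem.List.length_pyRange_one, Int.sub_zero]
    · intro k h1 h2
      have hkT : k < (List.replicate (mlv + 1).toNat (0 : Int)).length := by
        rw [← t1]; exact h1
      have hcv := t2 k hkT
      rw [pvGetDElem _ _ k h1] at hcv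
      rw [pvGetDElem _ _ k hkT, List.getElem_replicate] at hcv
      rw [hcv, zero_add]
      simp only [List.getElem_map, PySem.List.getElem_pyRange_one, zero_add, hnl]
  -- the param-count table
  have hT0rows : ∀ i : Nat, i < (List.replicate (mpv + 1).toNat (List.replicate K.length (0 : Int))).length →
      ((List.replicate (mpv + 1).toNat (List.replicate K.length (0 : Int))).getD i []).length = K.length := by
    intro i hi
    rw [pvGetDElem _ _ i hi, List.getElem_replicate, List.length_replicate]
  have hq1Kmem : ∀ q ∈ pvL0 p, q.1 ∈ K := by
    intro q hq
    rw [hKd, PySem.Set.mem_ofList]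
    exact List.mem_map.2 ⟨q, (hmemL0 q).1 hq, rfl⟩
  obtain ⟨d1, d2, d3⟩ := pvBumpFold (pvL0 p) (fun q => pvCnt p q) (fun q => LOC.2.1.getD q.1 0)
      K.length (List.replicate (mpv + 1).toNat (List.replicate K.length (0 : Int))) hT0rows (by
    intro q hq
    refine ⟨PySem.List.count p q, ?_⟩
    obtain ⟨k, hk, hkeq⟩ := List.getElem_of_mem (hq1Kmem q hq)
    refine ⟨k, rfl, ?_, ?_, hk⟩
    · show LOC.2.1.getD q.1 0 = (k : Int)
      rw [← hkeq, e4' k hk]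
    · have hle := hmpvle q hq
      have h0 : pvCnt p q = ((PySem.List.count p q : Nat) : Int) := rfl
      rw [h0] at hle
      rw [List.length_replicate]
      omega)
  have hfillA : K.foldl (fun pcll location =>
        (S.1.getD location PySem.Dict.empty).keys.foldl
          (fun pcll api => pvBump pcll ((S.1.getD location PySem.Dict.empty).getD api 0) (LOC.2.1.getD location 0)) pcll)
        (List.replicate (mpv + 1).toNat (List.replicate K.length (0 : Int)))
      = (pvL0 p).foldl (fun t q => pvBump t (pvCnt p q) (LOC.2.1.getD q.1 0))
        (List.replicate (mpv + 1).toNat (List.replicate K.length (0 : Int))) := by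
    have hstep2 : ∀ (t : List (List Int)) (l : String), l ∈ K →
        (S.1.getD l PySem.Dict.empty).keys.foldl
          (fun t a => pvBump t ((S.1.getD l PySem.Dict.empty).getD a 0) (LOC.2.1.getD l 0)) t
        = ((pvAs p l).map (fun a => (l, a))).foldl
          (fun t q => pvBump t (pvCnt p q) (LOC.2.1.getD q.1 0)) t := by
      intro t l _
      rw [hAs l, List.foldl_map]
      refine PySem.List.foldl_congr_mem _ _ _ _ (fun t a _ => ?_)
      dsimp only
      rw [hCnt l a]
    rw [PySem.List.foldl_congr_mem _ _ _ _ hstep2, hL0flat, List.foldl_flatMap]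
  have hcell : ∀ (i j : Nat) (hj : j < K.length),
      List.countP (fun q => pvCnt p q == (i : Int) && LOC.2.1.getD q.1 0 == (j : Int)) (pvL0 p)
        = List.countP (fun q => q.1 == K[j] && ((PySem.List.count p q : Nat) : Int) == (i : Int)) dp := by
    intro i j hj
    calc List.countP (fun q => pvCnt p q == (i : Int) && LOC.2.1.getD q.1 0 == (j : Int)) (pvL0 p)
        = List.countP (fun q => q.1 == K[j] && ((PySem.List.count p q : Nat) : Int) == (i : Int)) (pvL0 p) := by
          refine List.countP_congr ?_
          intro q hq
          obtain ⟨k, hk, hkeq⟩ := List.getElem_of_mem (hq1Kmem q hq)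
          rw [← hkeq, e4' k hk]
          simp only [Bool.and_eq_true, beq_iff_eq]
          constructor
          · rintro ⟨h1, h2⟩
            have hkj : k = j := by exact_mod_cast h2
            exact ⟨by subst hkj; rfl, h1⟩
          · rintro ⟨h1, h2⟩
            have hkj : k = j := (List.Nodup.getElem_inj_iff hKnd).1 h1
            exact ⟨h2, by rw [hkj]⟩
      _ = List.countP (fun q => q.1 == K[j] && ((PySem.List.count p q : Nat) : Int) == (i : Int)) dp :=
          hperm.countP_eq _
  have htab : (pvL0 p).foldl (fun t q => pvBump t (pvCnt p q) (LOC.2.1.getD q.1 0))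
        (List.replicate (mpv + 1).toNat (List.replicate K.length (0 : Int)))
      = List.map (fun c => List.map
          (fun loc => ((List.countP (fun q => q.1 == loc && ((PySem.List.count p q : Nat) : Int) == c) dp : Nat) : Int)) K)
          (PySem.List.pyRange 0 (mpv + 1)) := by
    apply List.ext_getElem
    · rw [d1, List.length_replicate, List.length_map, PySem.List.length_pyRange_one, Int.sub_zero]
    · intro i h1 h2
      have hiT : i < (List.replicate (mpv + 1).toNat (List.replicate K.length (0 : Int))).length := by
        rw [← d1]; exact h1
      have hrl := d2 i hiT
      rw [pvGetDElem _ _ i h1] at hrl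
      apply List.ext_getElem
      · rw [hrl, List.getElem_map, List.length_map]
      · intro j hj1 hj2
        have hjK : j < K.length := by rw [hrl] at hj1; exact hj1
        have hcv := d3 i j hiT hjK
        rw [pvGetDElem _ _ i h1, pvGetDElem _ _ j hj1] at hcv
        have hT0c : (((List.replicate (mpv + 1).toNat (List.replicate K.length (0 : Int))).getD i []).getD j 0) = 0 := by
          rw [pvGetDElem _ _ i hiT, List.getElem_replicate, pvGetDElem _ _ j (by rw [List.length_replicate]; exact hjK),
            List.getElem_replicate]
        rw [hT0c, zero_add] at hcv
        rw [hcv]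
        simp only [List.getElem_map, PySem.List.getElem_pyRange_one, zero_add]
        exact_mod_cast hcell i j hjK
  rw [hfillA, htab, htally]


-- ===== VERDICT (by name: the statement is the Claim_ definition above) =====
theorem count_request_param_location_spec : Claim_unchanged_count_request_param_location := by
  intro ds _ _ hD
  exact pv_main ds hD

theorem count_request_param_location_changed : Claim_changed_count_request_param_location := by
  unfold Claim_changed_count_request_param_location
  exact ⟨by decide, by decide, by decide, by decide, by decide, by decide⟩

theorem count_request_param_location_tight : Claim_exact_count_request_param_location := by
  intro ds _ _ hD
  subst hD
  decide
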